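-- pv_equiv track=rewrite | github.com/yogev100/Economic-Algorithms-Ex12 | max_matches.py | get_num_donates
-- ===== SOURCE A (Python) =====
-- from typing import List
--
-- def get_num_donates(subset:List[List[int]]):
--     n = len(subset)
--     temp_set = set([])
--     temp_len = 0
--     for i in range(0,n):
--         num = len(subset[i])
--         s = set(subset[i])
--         temp_set = temp_set | s
--         if len(temp_set) != temp_len + num:
--             return (), -1
--         temp_len += num
--     return subset, temp_len
-- ===== SOURCE B (Python) =====
-- def get_num_donates(subset):
--     total = sum(len(s) for s in subset)
--     all_elems = [x for s in subset for x in s]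
--     if len(set(all_elems)) == total:
--         return subset, total
--     return (), -1
-- ===== Notes on version B (the rewrite author's own statement) =====
-- stated objective: simpler
-- what changed: Replaced the incremental loop that maintains a cumulative union set with a per-step cardinality check by one aggregate computation: flatten all subsets, compare the number of distinct elements with the total raw length, and decide success in a single final test.
import Mathlib
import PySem

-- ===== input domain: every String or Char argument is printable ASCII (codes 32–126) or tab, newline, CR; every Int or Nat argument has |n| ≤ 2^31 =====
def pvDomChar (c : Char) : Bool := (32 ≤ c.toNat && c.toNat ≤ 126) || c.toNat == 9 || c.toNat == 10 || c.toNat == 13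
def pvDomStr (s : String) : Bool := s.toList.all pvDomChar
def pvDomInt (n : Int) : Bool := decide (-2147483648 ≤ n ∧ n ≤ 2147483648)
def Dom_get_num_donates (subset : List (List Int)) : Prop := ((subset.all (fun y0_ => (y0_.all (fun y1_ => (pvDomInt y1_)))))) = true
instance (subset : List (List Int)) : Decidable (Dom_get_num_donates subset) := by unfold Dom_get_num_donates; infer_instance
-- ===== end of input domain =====

-- B replaces A's incremental union-with-per-step-check loop by one aggregate check
-- (distinct count of the flattened elements vs total raw length); objective: simpler.

-- ===== PORT A =====
-- A's loop over range(0,n): cumulative union set 'temp_set', cumulative length 'temp_len',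
-- early return ((), -1) when a step's union does not grow by the subset's raw length.
def pvLoopA : List (List Int) → PySem.Set Int → Int → Option Int
  | [], _, tempLen => some tempLen
  | l :: rest, tempSet, tempLen =>
      let num : Int := l.length
      let s : PySem.Set Int := PySem.Set.ofList l
      let tempSet' := PySem.Set.union tempSet s
      if (tempSet'.length : Int) ≠ tempLen + num then none
      else pvLoopA rest tempSet' (tempLen + num)

def get_num_donates (subset : List (List Int)) : List (List Int) × Int :=
  match pvLoopA subset PySem.Set.empty 0 with
  | none => ([], -1)
  | some tempLen => (subset, tempLen)

-- ===== PORT B =====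
def get_num_donates_alt (subset : List (List Int)) : List (List Int) × Int :=
  let total : Int := (subset.map (fun s => (s.length : Int))).sum
  let allElems : List Int := subset.flatMap (fun s => s)
  if ((PySem.Set.ofList allElems).length : Int) = total then (subset, total)
  else ([], -1)

-- ===== PRECONDITION & SPEC =====
def Spec_get_num_donates (subset : List (List Int)) (out : List (List Int) × Int) : Prop := out = get_num_donates_alt subset
instance (subset : List (List Int)) (out : List (List Int) × Int) : Decidable (Spec_get_num_donates subset out) := by unfold Spec_get_num_donates; infer_instance

-- ===== CLAIM =====
def Claim_equal_get_num_donates : Prop := ∀ (subset : List (List Int)), Dom_get_num_donates subset → Spec_get_num_donates subset (get_num_donates subset)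

-- ===== LEMMAS AND PROOFS =====

-- updating with a list or with its deduplication is the same
theorem pv_update_ofList (s : PySem.Set Int) (l : List Int) :
    s.update (PySem.Set.ofList l) = s.update l := by
  rw [PySem.Set.update_eq_append_filter, PySem.Set.update_eq_append_filter,
      PySem.Set.ofList_ofList]

-- |s ∪ xs| ≤ |s| + |xs|
theorem pv_length_update_le (s : PySem.Set Int) (xs : List Int) :
    (s.update xs).length ≤ s.length + xs.length := by
  rw [PySem.Set.update_eq_append_filter, List.length_append]
  have h1 := List.length_filter_le (fun y => !s.contains y) (PySem.Set.ofList xs)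
  have h2 := PySem.Set.length_ofList_le (α := Int) xs
  omega

-- characterisation of A's loop from a nodup accumulated set
theorem pvLoopA_eq (rest : List (List Int)) : ∀ (ts : PySem.Set Int), ts.Nodup →
    pvLoopA rest ts (ts.length : Int) =
      (if (PySem.Set.update ts rest.flatten).length = ts.length + (rest.map List.length).sum
       then some ((ts.length : Int) + ((rest.map List.length).sum : Int)) else none) := by
  induction rest with
  | nil =>
      intro ts _
      simp [pvLoopA, PySem.Set.update_nil]
  | cons l rs ih =>
      intro ts hts
      have hu : PySem.Set.union ts (PySem.Set.ofList l) = ts.update l := pv_update_ofList ts l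
      have hle : (ts.update l).length ≤ ts.length + l.length := pv_length_update_le ts l
      show (if ((PySem.Set.union ts (PySem.Set.ofList l)).length : Int) ≠ (ts.length : Int) + (l.length : Int)
            then none
            else pvLoopA rs (PySem.Set.union ts (PySem.Set.ofList l)) ((ts.length : Int) + (l.length : Int))) = _
      rw [hu]
      by_cases h : (ts.update l).length = ts.length + l.length
      · have hInt : ((ts.update l).length : Int) = (ts.length : Int) + (l.length : Int) := by
          exact_mod_cast congrArg (Nat.cast : Nat → Int) h
        rw [if_neg (by simp [hInt])]
        have hnodup : (ts.update l).Nodup := PySem.Set.nodup_update ts l hts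
        have := ih (ts.update l) hnodup
        rw [← hInt, this]
        rw [List.flatten_cons, PySem.Set.update_append]
        have hsum : (((l :: rs).map List.length).sum) = l.length + ((rs.map List.length).sum) := by
          simp
        rw [hsum]
        by_cases hc : ((ts.update l).update rs.flatten).length = (ts.update l).length + (rs.map List.length).sum
        · rw [if_pos hc, if_pos (by omega)]
          congr 1
          push_cast
          omega
        · rw [if_neg hc, if_neg (by omega)]
      · rw [if_pos (by
          intro hInt
          exact h (by exact_mod_cast hInt))]
        have hlt : (ts.update l).length < ts.length + l.length := lt_of_le_of_ne hle h
        have hle2 : ((ts.update l).update rs.flatten).length ≤ (ts.update l).length + rs.flatten.length :=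
          pv_length_update_le _ _
        have hflat : rs.flatten.length = (rs.map List.length).sum := by
          simp [List.length_flatten]
        rw [if_neg (by
          rw [List.flatten_cons, PySem.Set.update_append]
          simp only [List.map_cons, List.sum_cons]
          omega)]

-- Int-cast of the summed lengths
theorem pv_sum_cast (ls : List (List Int)) :
    (ls.map (fun s => (s.length : Int))).sum = (((ls.map List.length).sum : Nat) : Int) := by
  induction ls with
  | nil => simp
  | cons l t ih => simp [ih]

-- ===== VERDICT =====
theorem get_num_donates_spec : Claim_equal_get_num_donates := by
  unfold Claim_equal_get_num_donates
  intro subset _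
  unfold Spec_get_num_donates get_num_donates get_num_donates_alt
  have h0 : pvLoopA subset PySem.Set.empty 0 =
      (if (PySem.Set.update PySem.Set.empty subset.flatten).length =
            (PySem.Set.empty : PySem.Set Int).length + (subset.map List.length).sum
       then some (((PySem.Set.empty : PySem.Set Int).length : Int) + ((subset.map List.length).sum : Int))
       else none) := pvLoopA_eq subset PySem.Set.empty List.nodup_nil
  simp only [PySem.Set.empty] at h0 ⊢
  rw [show ((0 : Int) = (([] : List Int).length : Int)) by simp] at h0 ⊢
  rw [h0]
  rw [PySem.Set.update_nil_left]
  have hflatMap : subset.flatMap (fun s => s) = subset.flatten := by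
    simp [List.flatMap_def]
  rw [hflatMap, pv_sum_cast]
  by_cases hc : (PySem.Set.ofList subset.flatten).length = (subset.map List.length).sum
  · rw [if_pos (by simpa using hc), if_pos (by exact_mod_cast hc)]
    simp
  · rw [if_neg (by simpa using hc), if_neg (by
      intro h; exact hc (by exact_mod_cast h))]
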